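-- pv_equiv track=rewrite | github.com/wie-florian/vu-gpa | GPA/2024SS/blatt4.py | find_available_seats
-- ===== SOURCE A (Python) =====
-- def find_available_seats(seats, n):
--     counter = 0
--     i = 0
--     for j in seats:
--         if j == '.':
--             counter += 1
--             if counter == n:
--                 return i - n + 1
--         else:
--             counter = 0
--         i += 1
--     return -1
-- ===== SOURCE B (Python) =====
-- from itertools import groupby
--
-- def find_available_seats(seats, n):
--     if n < 1:
--         return -1
--     idx = 0
--     for ch, grp in groupby(seats):
--         length = sum(1 for _ in grp)
--         if ch == '.' and length >= n:
--             return idx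
--         idx += length
--     return -1
-- ===== Notes on version B (the rewrite author's own statement) =====
-- stated objective: alternative
-- what changed: B groups the seats into maximal runs of equal elements (itertools.groupby) and returns the start index of the first '.'-run of length >= n, instead of A's element-by-element incremental counter with an early return mid-run.
import Mathlib
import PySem

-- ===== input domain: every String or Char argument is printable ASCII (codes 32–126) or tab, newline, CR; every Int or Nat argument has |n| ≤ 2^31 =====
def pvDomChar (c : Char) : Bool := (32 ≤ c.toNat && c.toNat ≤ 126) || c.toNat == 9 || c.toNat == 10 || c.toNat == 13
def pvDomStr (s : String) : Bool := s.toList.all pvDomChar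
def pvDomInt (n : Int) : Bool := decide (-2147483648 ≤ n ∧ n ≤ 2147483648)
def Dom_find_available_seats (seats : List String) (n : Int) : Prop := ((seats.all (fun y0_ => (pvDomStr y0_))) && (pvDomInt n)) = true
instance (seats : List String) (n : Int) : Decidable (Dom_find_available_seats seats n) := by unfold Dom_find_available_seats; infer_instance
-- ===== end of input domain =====

-- B re-implements the search with maximal runs (groupby) instead of an incremental counter; same O(n) cost, proved equal on all inputs.

-- ===== PORT A =====
-- the for-loop with state (counter, i) and early return
def goA (n : Int) : List String → Int → Int → Int
  | [], _, _ => -1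
  | j :: rest, counter, i =>
    if j = "." then
      if counter + 1 = n then i - n + 1
      else goA n rest (counter + 1) (i + 1)
    else goA n rest 0 (i + 1)

def find_available_seats (seats : List String) (n : Int) : Int := goA n seats 0 0

-- ===== PORT B =====
-- one step per maximal run of equal elements (groupby), carrying the run's start index
def goB (n : Int) : List String → Int → Int
  | [], _ => -1
  | x :: xs, idx =>
    let len : Int := ((xs.takeWhile (· = x)).length : Int) + 1
    let rest := xs.dropWhile (· = x)
    if x = "." ∧ n ≤ len then idx
    else goB n rest (idx + len)
termination_by xs => xs.length
decreasing_by
  have := List.length_dropWhile_le (fun y => decide (y = x)) xs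
  simp at *; omega

def find_available_seats_alt (seats : List String) (n : Int) : Int :=
  if n < 1 then -1 else goB n seats 0

-- ===== PRECONDITION & SPEC =====
def Spec_find_available_seats (seats : List String) (n : Int) (out : Int) : Prop := out = find_available_seats_alt seats n
instance (seats : List String) (n : Int) (out : Int) : Decidable (Spec_find_available_seats seats n out) := by unfold Spec_find_available_seats; infer_instance

-- ===== CLAIM (what is proved, stated in full; the proofs are below) =====
def Claim_equal_find_available_seats : Prop := ∀ (seats : List String) (n : Int), Dom_find_available_seats seats n → Spec_find_available_seats seats n (find_available_seats seats n)

-- ===== LEMMAS AND PROOFS =====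

-- with n ≤ 0 the counter (always ≥ 0 after an increment) never equals n, so A returns -1
lemma goA_nonpos (n : Int) (_hn : n < 1) :
    ∀ (xs : List String) (c i : Int), 0 ≤ c → goA n xs c i = -1 := by
  intro xs
  induction xs with
  | nil => intro c i _; simp [goA]
  | cons x xs ih =>
    intro c i hc
    by_cases hx : x = "."
    · have hne : ¬ (c + 1 = n) := by omega
      simp [goA, hx, hne]
      exact ih (c + 1) (i + 1) (by omega)
    · simp [goA, hx]
      exact ih 0 (i + 1) (by omega)

-- the counter is irrelevant when the head is not "."
lemma goA_head_ne (n c i : Int) (y : String) (ys : List String) (h : ¬ y = ".") :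
    goA n (y :: ys) c i = goA n ys 0 (i + 1) := by
  simp [goA, h]

-- one-step unfolding of B's run loop
lemma goB_cons (n : Int) (x : String) (xs : List String) (i : Int) :
    goB n (x :: xs) i =
      if x = "." ∧ n ≤ ((xs.takeWhile (· = x)).length : Int) + 1 then i
      else goB n (xs.dropWhile (· = x)) (i + (((xs.takeWhile (· = x)).length : Int) + 1)) := by
  rw [goB]

-- running A through a leading run of d dots with counter c (0 ≤ c < n): it returns i - c
-- if c + d ≥ n, and otherwise reaches the rest with counter c + d at index i + d
lemma goA_dots (n : Int) (_hn : 1 ≤ n) :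
    ∀ (xs : List String) (c i : Int), 0 ≤ c → c < n →
      goA n xs c i =
        if n ≤ c + ((xs.takeWhile (· = ".")).length : Int) then i - c
        else goA n (xs.dropWhile (· = "."))
              (c + ((xs.takeWhile (· = ".")).length : Int))
              (i + ((xs.takeWhile (· = ".")).length : Int)) := by
  intro xs
  induction xs with
  | nil =>
    intro c i hc hcn
    simp [goA]
    omega
  | cons x xs ih =>
    intro c i hc hcn
    by_cases hx : x = "."
    · subst hx
      have htw : ((("." : String) :: xs).takeWhile (· = ".")) = "." :: xs.takeWhile (· = ".") := by
        rfl
      have hdw : ((("." : String) :: xs).dropWhile (· = ".")) = xs.dropWhile (· = ".") := by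
        rfl
      rw [htw, hdw, List.length_cons]
      by_cases hhit : c + 1 = n
      · rw [if_pos (by push_cast; omega)]
        simp [goA, hhit]
        omega
      · have hlt : c + 1 < n := by omega
        have hA : goA n (("." : String) :: xs) c i = goA n xs (c + 1) (i + 1) := by
          simp [goA, hhit]
        rw [hA, ih (c + 1) (i + 1) (by omega) hlt]
        by_cases hcond : n ≤ c + 1 + ((xs.takeWhile (· = ".")).length : Int)
        · rw [if_pos hcond, if_pos (by push_cast; omega)]
          omega
        · rw [if_neg hcond, if_neg (by push_cast; omega)]
          congr 1 <;> push_cast <;> ring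
    · have htw : ((x :: xs).takeWhile (· = ".")) = [] :=
        List.takeWhile_cons_of_neg (by simpa using hx)
      have hdw : ((x :: xs).dropWhile (· = ".")) = x :: xs :=
        List.dropWhile_cons_of_neg (by simpa using hx)
      rw [htw, hdw]
      rw [if_neg (by simp; omega)]
      simp

-- skipping one non-dot element on B's side: the whole group it heads is skipped anyway
lemma goB_ne (n : Int) (x : String) (hx : ¬ x = ".") :
    ∀ (xs : List String) (i : Int), goB n (x :: xs) i = goB n xs (i + 1) := by
  intro xs i
  cases xs with
  | nil => simp [goB_cons, goB, hx]
  | cons y ys =>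
    by_cases hyx : y = x
    · subst hyx
      rw [goB_cons, goB_cons]
      have htw : ((y :: ys).takeWhile (· = y)) = y :: ys.takeWhile (· = y) :=
        List.takeWhile_cons_of_pos (by simp)
      have hdw : ((y :: ys).dropWhile (· = y)) = ys.dropWhile (· = y) :=
        List.dropWhile_cons_of_pos (by simp)
      rw [htw, hdw, if_neg (by simp [hx]), if_neg (by simp [hx])]
      congr 1
      simp only [List.length_cons]
      push_cast
      ring
    · rw [goB_cons]
      have htw : ((y :: ys).takeWhile (· = x)) = [] :=
        List.takeWhile_cons_of_neg (by simpa using hyx)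
      have hdw : ((y :: ys).dropWhile (· = x)) = y :: ys :=
        List.dropWhile_cons_of_neg (by simpa using hyx)
      rw [htw, hdw, if_neg (by simp [hx])]
      norm_num

lemma head_dropWhile_ne (p : String → Bool) :
    ∀ (xs : List String) (y : String) (ys : List String),
      xs.dropWhile p = y :: ys → p y = false := by
  intro xs
  induction xs with
  | nil => intro y ys h; simp [List.dropWhile] at h
  | cons x xs ih =>
    intro y ys h
    by_cases hpx : p x = true
    · rw [List.dropWhile_cons_of_pos hpx] at h
      exact ih y ys h
    · rw [List.dropWhile_cons_of_neg hpx] at h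
      cases h
      simpa using hpx

-- the main induction: at a run boundary (counter 0) A and B agree, for n ≥ 1
lemma goA_eq_goB (n : Int) (hn : 1 ≤ n) :
    ∀ (m : Nat) (xs : List String), xs.length ≤ m → ∀ (i : Int), goA n xs 0 i = goB n xs i := by
  intro m
  induction m with
  | zero =>
    intro xs hlen i
    have : xs = [] := by cases xs <;> simp_all
    subst this
    simp [goA, goB]
  | succ m ih =>
    intro xs hlen i
    cases xs with
    | nil => simp [goA, goB]
    | cons x xs =>
      by_cases hx : x = "."
      · subst hx
        have hdots := goA_dots n hn (("." : String) :: xs) 0 i (le_refl 0) (by omega)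
        have htw : ((("." : String) :: xs).takeWhile (· = ".")) = "." :: xs.takeWhile (· = ".") := by
          rfl
        have hdw : ((("." : String) :: xs).dropWhile (· = ".")) = xs.dropWhile (· = ".") := by
          rfl
        rw [htw, hdw, List.length_cons] at hdots
        rw [goB_cons]
        by_cases hcond : n ≤ ((xs.takeWhile (· = ".")).length : Int) + 1
        · rw [if_pos ⟨rfl, hcond⟩, hdots, if_pos (by push_cast; omega)]
          omega
        · rw [if_neg (by simp; omega), hdots, if_neg (by push_cast; omega)]
          set r := xs.dropWhile (· = ".") with hr
          have hrlen : r.length ≤ m := by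
            rw [hr]
            have := List.length_dropWhile_le (fun y => decide (y = ".")) xs
            simp only [List.length_cons] at hlen
            omega
          have hstep : goA n r (0 + (((xs.takeWhile (· = ".")).length : Nat) + 1 : Nat))
              (i + (((xs.takeWhile (· = ".")).length : Nat) + 1 : Nat))
              = goA n r 0 (i + (((xs.takeWhile (· = ".")).length : Nat) + 1 : Nat)) := by
            cases hcase : r with
            | nil => simp [goA]
            | cons y ys =>
              have hy : ¬ y = "." := by
                have := head_dropWhile_ne (fun z => decide (z = ".")) xs y ys (by rw [← hr, hcase])
                simpa using this
              rw [goA_head_ne _ _ _ _ _ hy, goA_head_ne _ _ _ _ _ hy]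
          rw [hstep, ih r hrlen]
          congr 1
      · rw [goA_head_ne n 0 i x xs hx, goB_ne n x hx]
        exact ih xs (by simp at hlen; omega) (i + 1)

-- ===== VERDICT (by name: the statement is the Claim_ definition above) =====
theorem find_available_seats_spec : Claim_equal_find_available_seats := by
  intro seats n _
  unfold Spec_find_available_seats find_available_seats find_available_seats_alt
  by_cases hn : n < 1
  · rw [if_pos hn]
    exact goA_nonpos n hn seats 0 0 (le_refl 0)
  · rw [if_neg hn]
    exact goA_eq_goB n (by omega) seats.length seats (le_refl _) 0
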